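-- pv_equiv track=rewrite | github.com/elvizhuy/Python | giuaky/2.py | is_decreasing_increasing
-- ===== SOURCE A (Python) =====
-- def is_decreasing_increasing(s):
--     n = len(s)
--     if n != 8:
--         return "NO"
--
--     i = 1
--     while i < n and s[i] < s[i - 1]:
--         i += 1
--
--     if i == 1:
--         return "NO"
--
--     while i < n and s[i] > s[i - 1]:
--         i += 1
--
--     if i == n:
--         return "YES"
--
--     return "NO"
-- ===== SOURCE B (Python) =====
-- def is_decreasing_increasing(s):
--     n = len(s)
--     if n != 8:
--         return "NO"
--     p = s.index(min(s))
--     if p == 0: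
--         return "NO"
--     dec = all(s[j] < s[j - 1] for j in range(1, p + 1))
--     inc = all(s[j] > s[j - 1] for j in range(p + 1, n))
--     return "YES" if dec and inc else "NO"
-- ===== Notes on version B (the rewrite author's own statement) =====
-- stated objective: alternative
-- what changed: Replaces A's stateful two-phase index walk with a valley-first decomposition: locate the valley once as the first index of the minimum character, then verify the strictly-decreasing prefix and strictly-increasing suffix with two independent all() scans.
import Mathlib
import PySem

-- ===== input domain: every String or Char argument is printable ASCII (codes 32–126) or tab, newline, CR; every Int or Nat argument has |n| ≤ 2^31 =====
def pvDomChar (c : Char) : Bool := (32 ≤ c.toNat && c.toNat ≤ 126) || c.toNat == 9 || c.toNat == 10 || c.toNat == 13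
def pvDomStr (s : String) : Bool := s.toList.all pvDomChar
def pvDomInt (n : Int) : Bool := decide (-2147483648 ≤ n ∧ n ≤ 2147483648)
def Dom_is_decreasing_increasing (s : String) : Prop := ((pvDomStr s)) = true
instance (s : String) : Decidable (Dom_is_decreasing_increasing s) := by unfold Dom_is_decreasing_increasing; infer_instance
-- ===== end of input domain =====

-- B locates the valley once as the first index of the minimum character and verifies the
-- strictly-decreasing prefix and strictly-increasing suffix with two independent scans,
-- instead of A's single stateful two-phase index walk (objective: alternative decomposition).

-- ===== PORT A =====
-- generic transliteration of Python's 'while i < n and cond(i): i += 1'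
def pvWhile (n : Nat) (c : Nat → Bool) (i : Nat) : Nat :=
  if i < n ∧ c i = true then pvWhile n c (i + 1) else i
termination_by n - i

def is_decreasing_increasing (s : String) : String :=
  let l := s.toList
  let n := l.length
  if n ≠ 8 then "NO"
  else
    -- while i < n and s[i] < s[i-1]: i += 1   (indices stay in [0, n), so getD is exact)
    let i := pvWhile n (fun j => decide (l.getD j default < l.getD (j - 1) default)) 1
    if i = 1 then "NO"
    else
      -- while i < n and s[i] > s[i-1]: i += 1
      let i2 := pvWhile n (fun j => decide (l.getD (j - 1) default < l.getD j default)) i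
      if i2 = n then "YES" else "NO"

-- ===== PORT B =====
def is_decreasing_increasing_alt (s : String) : String :=
  let l := s.toList
  let n := l.length
  if n ≠ 8 then "NO"
  else
    match PySem.List.min? l (fun c => c) with      -- min(s): l is nonempty here (n = 8)
    | none => "NO"                                  -- unreachable
    | some m =>
      match PySem.List.index? l m with              -- s.index(min(s)): m ∈ l, so some
      | none => "NO"                                -- unreachable
      | some p =>
        if p = 0 then "NO"
        else
          -- all(s[j] < s[j-1] for j in range(1, p+1))
          let dec := (List.range' 1 p).all (fun j => decide (l.getD j default < l.getD (j - 1) default))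
          -- all(s[j] > s[j-1] for j in range(p+1, n))
          let inc := (List.range' (p + 1) (n - (p + 1))).all (fun j => decide (l.getD (j - 1) default < l.getD j default))
          if dec ∧ inc then "YES" else "NO"

-- ===== PRECONDITION & SPEC =====
def Spec_is_decreasing_increasing (s : String) (out : String) : Prop := out = is_decreasing_increasing_alt s
instance (s : String) (out : String) : Decidable (Spec_is_decreasing_increasing s out) := by unfold Spec_is_decreasing_increasing; infer_instance

-- ===== CLAIM (what is proved, stated in full; the proofs are below) =====
def Claim_equal_is_decreasing_increasing : Prop := ∀ (s : String), Dom_is_decreasing_increasing s → Spec_is_decreasing_increasing s (is_decreasing_increasing s)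

-- ===== LEMMAS AND PROOFS =====

-- what the while loop returns: the first index ≥ i where the condition fails (or n)
theorem pvWhile_spec (n : Nat) (c : Nat → Bool) : ∀ i, i ≤ n →
    i ≤ pvWhile n c i ∧ pvWhile n c i ≤ n ∧
    (∀ j, i ≤ j → j < pvWhile n c i → c j = true) ∧
    (pvWhile n c i < n → c (pvWhile n c i) = false) := by
  intro i hi
  induction' hfuel : n - i using Nat.strong_induction_on with fuel ih generalizing i
  rw [pvWhile]
  split
  · rename_i h
    have hi' : i + 1 ≤ n := h.1
    obtain ⟨h1, h2, h3, h4⟩ := ih (n - (i+1)) (by omega) (i+1) hi' rfl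
    refine ⟨by omega, h2, ?_, h4⟩
    intro j hj hj'
    rcases Nat.eq_or_lt_of_le hj with rfl | hj
    · exact h.2
    · exact h3 j hj hj'
  · rename_i h
    refine ⟨le_refl _, hi, fun j hj hj' => by omega, fun hlt => ?_⟩
    cases hci : c i with
    | false => rfl
    | true => exact absurd ⟨hlt, hci⟩ h

theorem pvWhile_eq (n : Nat) (c : Nat → Bool) : ∀ i k, i ≤ k → k ≤ n →
    (∀ j, i ≤ j → j < k → c j = true) → (k = n ∨ c k = false) → pvWhile n c i = k := by
  intro i k hik hkn hall hend
  induction' hfuel : k - i using Nat.strong_induction_on with fuel ih generalizing i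
  rw [pvWhile]
  rcases Nat.eq_or_lt_of_le hik with rfl | hlt
  · split
    · rename_i h
      rcases hend with rfl | hf
      · omega
      · rw [hf] at h; simp at h
    · rfl
  · rw [if_pos ⟨by omega, hall i (le_refl _) hlt⟩]
    exact ih (k - (i+1)) (by omega) (i+1) hlt (fun j hj => hall j (by omega)) rfl

-- strictly decreasing chain: inside [0, k), later entries are smaller
theorem chain_down (f : Nat → Char) (k : Nat)
    (h : ∀ t, 1 ≤ t → t < k → f t < f (t - 1)) :
    ∀ j i, i < j → j < k → f j < f i := by
  intro j
  induction j with
  | zero => omega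
  | succ j ih =>
    intro i hij hjk
    have hs : f (j + 1) < f j := by simpa using h (j + 1) (by omega) hjk
    rcases Nat.lt_or_ge i j with hi | hi
    · exact lt_trans hs (ih i hi (by omega))
    · have : i = j := by omega
      subst this; exact hs

-- strictly increasing chain on [a-1, n)
theorem chain_up (f : Nat → Char) (a n : Nat)
    (h : ∀ t, a ≤ t → t < n → f (t - 1) < f t) :
    ∀ j i, a - 1 ≤ i → i < j → j < n → f i < f j := by
  intro j
  induction j with
  | zero => omega
  | succ j ih =>
    intro i hai hij hjn
    have hs : f j < f (j + 1) := by simpa using h (j + 1) (by omega) hjn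
    rcases Nat.lt_or_ge i j with hi | hi
    · exact lt_trans (ih i hai hi (by omega)) hs
    · have : i = j := by omega
      subst this; exact hs

-- the heart: on a length-8 string both decision procedures agree
theorem core_equiv (s : String) (hn8 : s.toList.length = 8) :
    is_decreasing_increasing s = is_decreasing_increasing_alt s := by
  set l := s.toList with hl
  set n := l.length with hnn
  set f : Nat → Char := fun j => l.getD j default with hf
  set c1 : Nat → Bool := fun j => decide (f j < f (j - 1)) with hc1
  set c2 : Nat → Bool := fun j => decide (f (j - 1) < f j) with hc2
  have hn : n = 8 := hn8
  -- A's value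
  set k := pvWhile n c1 1 with hk
  obtain ⟨hk1, hkn, hkall, hkend⟩ := pvWhile_spec n c1 1 (by omega)
  -- B's pieces
  have hne : l ≠ [] := by intro h; simp [h] at hnn; omega
  obtain ⟨m, hm⟩ : ∃ m, PySem.List.min? l (fun c => c) = some m := by
    cases hmm : PySem.List.min? l (fun c => c) with
    | none => exact absurd ((PySem.List.min?_eq_none_iff l _).1 hmm) hne
    | some m => exact ⟨m, rfl⟩
  have hmmem := PySem.List.min?_mem hm
  have hmmin : ∀ y ∈ l, m ≤ y := PySem.List.min?_isMin hm
  obtain ⟨p, hp⟩ : ∃ p, PySem.List.index? l m = some p := by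
    cases hpp : PySem.List.index? l m with
    | none => exact absurd hmmem ((PySem.List.index?_eq_none_iff l m).1 hpp)
    | some p => exact ⟨p, rfl⟩
  obtain ⟨hplt, hpm, hpfirst⟩ := PySem.List.getElem_of_index?_eq_some hp
  have hfp : f p = m := by
    simp only [hf]; rw [List.getD_eq_getElem l default hplt]; exact hpm
  have hfmin : ∀ j, j < n → m ≤ f j := by
    intro j hj
    have hj' : j < l.length := by omega
    have hgj : f j = l[j] := by simp only [hf]; rw [List.getD_eq_getElem l default hj']
    rw [hgj]; exact hmmin _ (List.getElem_mem hj')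
  -- equivalence of the two YES conditions
  have main : (k ≠ 1 ∧ pvWhile n c2 k = n) ↔
      (¬ p = 0 ∧ (∀ j, 1 ≤ j → j < 1 + p → f j < f (j - 1)) ∧ (∀ j, p + 1 ≤ j → j < n → f (j - 1) < f j)) := by
    constructor
    · rintro ⟨hk1', h2⟩
      have hk2 : 2 ≤ k := by omega
      obtain ⟨hi1, hi2, hiall, _⟩ := pvWhile_spec n c2 k (by omega)
      have hdec : ∀ t, 1 ≤ t → t < k → f t < f (t - 1) := by
        intro t h1 h2'; have := hkall t h1 h2'; simpa [hc1] using this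
      have hinc : ∀ t, k ≤ t → t < n → f (t - 1) < f t := by
        intro t h1 h2'
        have := hiall t h1 (by omega)
        simpa [hc2] using this
      -- f (k-1) is the strict minimum of the list
      have hstrict : ∀ j, j < n → j ≠ k - 1 → f (k - 1) < f j := by
        intro j hj hne'
        rcases Nat.lt_or_ge j (k - 1) with hlt | hge
        · exact chain_down f k hdec (k - 1) j hlt (by omega)
        · exact chain_up f k n hinc j (k - 1) (le_refl _) (by omega) hj
      have hmq : m = f (k - 1) := by
        obtain ⟨q, hq, hqm⟩ := List.getElem_of_mem hmmem
        have hfq : f q = m := by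
          simp only [hf]; rw [List.getD_eq_getElem l default hq]; exact hqm
        by_cases hqe : q = k - 1
        · rw [← hfq, hqe]
        · have h1 := hstrict q hq hqe
          rw [hfq] at h1
          exact absurd (hfmin (k - 1) (by omega)) (not_le.mpr h1)
      have hpk : p = k - 1 := by
        by_cases hpe : p = k - 1
        · exact hpe
        · have h1 : f (k - 1) < f p := hstrict p hplt hpe
          rw [hfp, hmq] at h1
          exact absurd h1 (lt_irrefl _)
      subst hpk
      exact ⟨by omega, fun j h1 h2' => hdec j h1 (by omega), fun j h1 h2' => hinc j (by omega) h2'⟩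
    · rintro ⟨hp0, hdec, hinc⟩
      have hkeq : k = p + 1 := by
        rw [hk]
        apply pvWhile_eq n c1 1 (p + 1) (by omega) (by omega)
        · intro j h1 h2'
          simp only [hc1, decide_eq_true_eq]
          exact hdec j h1 (by omega)
        · rcases Nat.eq_or_lt_of_le (Nat.succ_le_of_lt hplt) with h | h
          · exact Or.inl h
          · refine Or.inr ?_
            simp only [hc1, decide_eq_false_iff_not, not_lt]
            exact le_of_lt (by simpa using hinc (p + 1) (le_refl _) h)
      refine ⟨by omega, ?_⟩
      rw [hkeq]
      apply pvWhile_eq n c2 (p + 1) n (by omega) (le_refl _)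
      · intro j h1 h2'
        simp only [hc2, decide_eq_true_eq]
        exact hinc j h1 h2'
      · exact Or.inl rfl
  -- B's dec/inc booleans unpacked
  have hdec_iff : ((List.range' 1 p).all (fun j => decide (l.getD j default < l.getD (j - 1) default)) = true)
      ↔ (∀ j, 1 ≤ j → j < 1 + p → f j < f (j - 1)) := by
    simp only [List.all_eq_true, List.mem_range'_1, decide_eq_true_eq, hf]
    constructor
    · intro h j h1 h2; exact h j ⟨h1, h2⟩
    · intro h j hj; exact h j hj.1 hj.2
  have hinc_iff : ((List.range' (p + 1) (n - (p + 1))).all (fun j => decide (l.getD (j - 1) default < l.getD j default)) = true)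
      ↔ (∀ j, p + 1 ≤ j → j < n → f (j - 1) < f j) := by
    simp only [List.all_eq_true, List.mem_range'_1, decide_eq_true_eq, hf]
    constructor
    · intro h j h1 h2; exact h j ⟨h1, by omega⟩
    · intro h j hj; exact h j hj.1 (by omega)
  -- now evaluate both programs
  have hA : is_decreasing_increasing s =
      (if k = 1 then "NO" else if pvWhile n c2 k = n then "YES" else "NO") := by
    simp only [is_decreasing_increasing, ← hl, ← hnn, if_neg (not_not_intro hn)]
    rfl
  have hB : is_decreasing_increasing_alt s =
      (if p = 0 then "NO"
       else if ((List.range' 1 p).all (fun j => decide (l.getD j default < l.getD (j - 1) default)) = true)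
              ∧ ((List.range' (p + 1) (n - (p + 1))).all (fun j => decide (l.getD (j - 1) default < l.getD j default)) = true)
            then "YES" else "NO") := by
    simp only [is_decreasing_increasing_alt, ← hl, ← hnn, if_neg (not_not_intro hn), hm, hp]
  rw [hA, hB]
  by_cases hyes : k ≠ 1 ∧ pvWhile n c2 k = n
  · obtain ⟨hp0, hd, hi⟩ := main.1 hyes
    rw [if_neg hyes.1, if_pos hyes.2, if_neg hp0,
      if_pos ⟨hdec_iff.2 hd, hinc_iff.2 hi⟩]
  · have hno : ¬ (¬ p = 0 ∧ (∀ j, 1 ≤ j → j < 1 + p → f j < f (j - 1)) ∧ (∀ j, p + 1 ≤ j → j < n → f (j - 1) < f j)) :=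
      fun h => hyes (main.2 h)
    have hNOr : (¬ p = 0) →
        ¬ (((List.range' 1 p).all (fun j => decide (l.getD j default < l.getD (j - 1) default)) = true)
           ∧ ((List.range' (p + 1) (n - (p + 1))).all (fun j => decide (l.getD (j - 1) default < l.getD j default)) = true)) := by
      intro hp0 hbt
      exact hno ⟨hp0, hdec_iff.1 hbt.1, hinc_iff.1 hbt.2⟩
    by_cases hk1 : k = 1
    · rw [if_pos hk1]
      by_cases hp0 : p = 0
      · rw [if_pos hp0]
      · rw [if_neg hp0, if_neg (hNOr hp0)]
    · rw [if_neg hk1]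
      have h2 : pvWhile n c2 k ≠ n := fun h => hyes ⟨hk1, h⟩
      rw [if_neg h2]
      by_cases hp0 : p = 0
      · rw [if_pos hp0]
      · rw [if_neg hp0, if_neg (hNOr hp0)]

-- ===== VERDICT (by name: the statement is the Claim_ definition above) =====
theorem is_decreasing_increasing_spec : Claim_equal_is_decreasing_increasing := by
  intro s _
  unfold Spec_is_decreasing_increasing
  by_cases hn : s.toList.length = 8
  · exact core_equiv s hn
  · simp only [is_decreasing_increasing, is_decreasing_increasing_alt, if_pos hn]
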